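-- pv_equiv track=rewrite | github.com/camrdale/advent-of-code | year2016/day25/part1.py | is_clock
-- ===== SOURCE A (Python) =====
-- def is_clock(output: list[int]) -> bool:
--     if any(output[i] != 0 for i in range(0, len(output), 2)):
--         return False
--     if any(output[i] != 1 for i in range(1, len(output), 2)):
--         return False
--     if output[-1] != 1:
--         return False
--     return True
-- ===== SOURCE B (Python) =====
-- def is_clock(output: list[int]) -> bool:
--     for i, v in enumerate(output):
--         if v != i % 2:
--             return False
--     return output[-1] == 1
-- ===== Notes on version B (the rewrite author's own statement) =====
-- stated objective: simpler
-- what changed: Replaces A's two strided index passes (even indices all 0, odd indices all 1) plus a final last-element test with one linear enumerate loop checking v == i % 2, followed by the same last-element == 1 test.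
-- outside the precondition, e.g. on is_clock([]): A raises IndexError, B raises IndexError
import Mathlib
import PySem

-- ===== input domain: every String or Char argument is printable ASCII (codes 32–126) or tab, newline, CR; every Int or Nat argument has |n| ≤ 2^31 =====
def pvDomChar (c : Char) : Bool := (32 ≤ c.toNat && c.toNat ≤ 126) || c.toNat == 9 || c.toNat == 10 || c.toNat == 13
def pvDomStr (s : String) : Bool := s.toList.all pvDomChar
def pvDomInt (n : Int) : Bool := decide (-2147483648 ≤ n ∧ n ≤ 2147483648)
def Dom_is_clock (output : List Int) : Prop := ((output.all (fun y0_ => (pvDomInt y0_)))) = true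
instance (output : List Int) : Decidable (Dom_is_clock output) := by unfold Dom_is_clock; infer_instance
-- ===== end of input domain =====

-- B replaces A's two strided index passes with one linear enumerate loop checking v == i % 2 (objective: simpler); same final last-element test.

-- ===== PORT A =====
def is_clock (output : List Int) : Bool :=
  if (PySem.List.pyRange 0 (output.length : Int) 2).any
      (fun i => PySem.List.pyGetD output i 0 != 0) then false
  else if (PySem.List.pyRange 1 (output.length : Int) 2).any
      (fun i => PySem.List.pyGetD output i 0 != 1) then false
  -- the last-element access: in range under Pre_ (output nonempty); the pyGetD default is never used there
  else if PySem.List.pyGetD output (-1) 0 != 1 then false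
  else true

-- ===== PORT B =====
-- the 'for i, v in enumerate(output)' loop with early return False
def altLoop (i : Nat) : List Int → Bool
  | [] => true
  | v :: rest => if v ≠ ((i % 2 : Nat) : Int) then false else altLoop (i + 1) rest

def is_clock_alt (output : List Int) : Bool :=
  if altLoop 0 output then PySem.List.pyGetD output (-1) 0 == 1
  else false

-- ===== PRECONDITION & SPEC =====
-- Pre_ excludes only the empty list, where both Pythons raise IndexError at the last-element access.
def Pre_is_clock (output : List Int) : Prop := output ≠ []
instance (output : List Int) : Decidable (Pre_is_clock output) := by unfold Pre_is_clock; infer_instance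
def pvWitness_is_clock : List Int := [0, 1]

def Spec_is_clock (output : List Int) (out : Bool) : Prop := out = is_clock_alt output
instance (output : List Int) (out : Bool) : Decidable (Spec_is_clock output out) := by unfold Spec_is_clock; infer_instance

-- ===== CLAIM (what is proved, stated in full; the proofs are below) =====
def Claim_equal_is_clock : Prop := ∀ (output : List Int), Dom_is_clock output → Pre_is_clock output → Spec_is_clock output (is_clock output)

-- ===== LEMMAS AND PROOFS =====

-- B's loop accepts iff every remaining element matches the parity of its global index
theorem altLoop_iff (xs : List Int) (s : Nat) :
    altLoop s xs = true ↔ ∀ k, (h : k < xs.length) → xs[k] = (((s + k) % 2 : Nat) : Int) := by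
  induction xs generalizing s with
  | nil => simp [altLoop]
  | cons v rest ih =>
    simp only [altLoop]
    split_ifs with hv
    · constructor
      · intro h; exact absurd h (by simp)
      · intro hall
        have h0 := hall 0 (by simp)
        simp at h0
        exact hv h0
    · rw [ih (s + 1)]
      constructor
      · intro hall k hk
        cases k with
        | zero =>
          simpa using not_ne_iff.mp hv
        | succ m =>
          have hm : m < rest.length := by simpa using Nat.lt_of_succ_lt_succ hk
          have hrec := hall m hm
          simp only [List.getElem_cons_succ]
          have heq : s + 1 + m = s + (m + 1) := by omega
          rw [← heq]; exact hrec
      · intro hall k hk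
        have hrec := hall (k + 1) (by simpa using Nat.succ_lt_succ hk)
        simp only [List.getElem_cons_succ] at hrec
        have heq : s + (k + 1) = s + 1 + k := by omega
        rw [heq] at hrec; exact hrec

-- A's strided any-pass starting at r is false iff every index ≡ r (mod 2) holds c
theorem anyA_false_iff (xs : List Int) (r c : Int) (hr : 0 ≤ r) :
    ((PySem.List.pyRange r (xs.length : Int) 2).any
        (fun i => PySem.List.pyGetD xs i 0 != c) = false)
      ↔ ∀ k, (h : k < xs.length) → r ≤ (k : Int) → (2 : Int) ∣ (k : Int) - r → xs[k] = c := by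
  rw [List.any_eq_false]
  constructor
  · intro h k hk hrk hdvd
    have hmem : (k : Int) ∈ PySem.List.pyRange r (xs.length : Int) 2 := by
      rw [PySem.List.mem_pyRange_iff_of_pos (by norm_num)]
      exact ⟨hrk, by exact_mod_cast hk, hdvd⟩
    have := h _ hmem
    simp only [bne_iff_ne, ne_eq, not_not] at this
    rw [PySem.List.pyGetD_natCast, List.getD_eq_getElem _ _ hk] at this
    exact this
  · intro h i hmem
    rw [PySem.List.mem_pyRange_iff_of_pos (by norm_num)] at hmem
    obtain ⟨h1, h2, h3⟩ := hmem
    have hi0 : 0 ≤ i := le_trans hr h1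
    have hk : i.toNat < xs.length := by omega
    have := h i.toNat hk (by omega) (by
      have hcast : ((i.toNat : Int)) = i := by omega
      rw [hcast]; exact h3)
    simp only [bne_iff_ne, ne_eq, not_not]
    rw [PySem.List.pyGetD_eq_getElem xs 0 hi0 (by omega)]
    exact this

-- the two strided passes together are exactly B's linear loop
theorem passes_iff_loop (xs : List Int) :
    (((PySem.List.pyRange 0 (xs.length : Int) 2).any
        (fun i => PySem.List.pyGetD xs i 0 != 0) = false) ∧
     ((PySem.List.pyRange 1 (xs.length : Int) 2).any
        (fun i => PySem.List.pyGetD xs i 0 != 1) = false))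
      ↔ altLoop 0 xs = true := by
  rw [anyA_false_iff xs 0 0 le_rfl, anyA_false_iff xs 1 1 (by norm_num), altLoop_iff]
  constructor
  · rintro ⟨he, ho⟩ k hk
    rcases Nat.even_or_odd k with hpar | hpar
    · have h0 : k % 2 = 0 := Nat.even_iff.mp hpar
      have := he k hk (by omega) (by
        obtain ⟨m, hm⟩ := hpar; exact ⟨m, by omega⟩)
      simpa [h0] using this
    · have h1 : k % 2 = 1 := Nat.odd_iff.mp hpar
      have := ho k hk (by
        obtain ⟨m, hm⟩ := hpar; omega) (by
        obtain ⟨m, hm⟩ := hpar; exact ⟨m, by omega⟩)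
      simpa [h1] using this
  · intro hall
    refine ⟨fun k hk _ hdvd => ?_, fun k hk _ hdvd => ?_⟩
    · have h0 : k % 2 = 0 := by
        obtain ⟨m, hm⟩ := hdvd; omega
      simpa [h0] using hall k hk
    · have h1 : k % 2 = 1 := by
        obtain ⟨m, hm⟩ := hdvd; omega
      simpa [h1] using hall k hk

-- ===== VERDICT (by name: the statement is the Claim_ definition above) =====
theorem is_clock_spec : Claim_equal_is_clock := by
  intro output _ _
  unfold Spec_is_clock is_clock is_clock_alt
  by_cases hloop : altLoop 0 output = true
  · have ⟨he, ho⟩ := (passes_iff_loop output).mpr hloop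
    rw [he, ho, hloop]
    simp only [Bool.false_eq_true, if_false, if_true]
    by_cases hlast : PySem.List.pyGetD output (-1) 0 = 1 <;> simp [hlast]
  · rw [if_neg (show ¬ altLoop 0 output = true from hloop)]
    by_cases he : (PySem.List.pyRange 0 ((output.length : Int)) 2).any
        (fun i => PySem.List.pyGetD output i 0 != 0) = true
    · rw [if_pos he]
    · have he' : ((PySem.List.pyRange 0 ((output.length : Int)) 2).any
          (fun i => PySem.List.pyGetD output i 0 != 0)) = false := by simpa using he
      rw [he', if_neg (by simp)]
      have ho : (PySem.List.pyRange 1 ((output.length : Int)) 2).any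
          (fun i => PySem.List.pyGetD output i 0 != 1) = true := by
        by_contra h
        exact hloop ((passes_iff_loop output).mp ⟨he', by simpa using h⟩)
      rw [if_pos ho]
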